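-- pv_equiv track=rewrite | github.com/Sensible-life/HistoryTeller | ID418/kinship_analysis.py | _check_consecutive_generations
-- ===== SOURCE A (Python) =====
-- def _check_consecutive_generations(years, gen_gap_min=20, gen_gap_max=40):
--     """연속 세대 확인 (세대 간격 20-40년)"""
--     if len(years) < 2:
--         return 1
--
--     consecutive = 1
--     max_consecutive = 1
--
--     for i in range(1, len(years)):
--         gap = years[i] - years[i-1]
--         if gen_gap_min <= gap <= gen_gap_max:
--             consecutive += 1
--             max_consecutive = max(max_consecutive, consecutive)
--         else:
--             consecutive = 1
--
--     return max_consecutive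
-- ===== SOURCE B (Python) =====
-- def _check_consecutive_generations(years, gen_gap_min=20, gen_gap_max=40):
--     """Two-phase re-implementation: build the list of gap-validity flags, split it
--     into maximal runs of equal flags, and return 1 + the longest True run."""
--     if len(years) < 2:
--         return 1
--     flags = [gen_gap_min <= b - a <= gen_gap_max for a, b in zip(years, years[1:])]
--     runs = _runs(flags)
--     best = 0
--     for f, k in runs:
--         if f:
--             best = max(best, k)
--     return best + 1
--
--
-- def _runs(flags):
--     """Run-length encode a list of booleans: [(value, run_length), ...]."""
--     runs = []
--     i = 0
--     n = len(flags)
--     while i < n: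
--         f = flags[i]
--         k = i + 1
--         while k < n and flags[k] == f:
--             k += 1
--         runs.append((f, k - i))
--         i = k
--     return runs
-- ===== Notes on version B (the rewrite author's own statement) =====
-- stated objective: alternative
-- what changed: A's single forward pass with a running consecutive-counter is replaced by a two-phase decomposition: first build the list of gap-validity flags from adjacent pairs, then run-length encode that flag list and return 1 + the maximum length among the True runs.
import Mathlib
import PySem

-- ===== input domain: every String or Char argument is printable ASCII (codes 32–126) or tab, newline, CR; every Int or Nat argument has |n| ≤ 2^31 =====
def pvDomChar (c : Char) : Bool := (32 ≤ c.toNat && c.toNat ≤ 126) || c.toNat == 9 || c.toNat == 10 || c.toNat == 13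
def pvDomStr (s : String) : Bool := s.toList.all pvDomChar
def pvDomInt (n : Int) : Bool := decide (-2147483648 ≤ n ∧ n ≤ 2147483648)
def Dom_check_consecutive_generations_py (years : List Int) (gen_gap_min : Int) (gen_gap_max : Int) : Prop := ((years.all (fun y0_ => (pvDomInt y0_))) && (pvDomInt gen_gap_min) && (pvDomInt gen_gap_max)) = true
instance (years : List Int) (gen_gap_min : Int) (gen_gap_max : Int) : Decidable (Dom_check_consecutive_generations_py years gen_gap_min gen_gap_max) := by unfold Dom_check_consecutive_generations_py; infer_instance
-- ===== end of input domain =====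

-- B replaces A's single-pass running counter by a two-phase decomposition (gap-validity
-- flags, then run-length encoding and a max over the True runs); objective: alternative,
-- not faster; return values proved equal on all inputs.

-- ===== PORT A =====
-- literal port of A: guard, then a for-loop over range(1, len(years)) carrying
-- (consecutive, max_consecutive)
def check_consecutive_generations_py (years : List Int) (gen_gap_min : Int) (gen_gap_max : Int) : Int :=
  if years.length < 2 then 1
  else
    let st := (PySem.List.pyRange 1 (years.length : Int) 1).foldl
      (fun (st : Int × Int) i =>
        let gap := PySem.List.pyGetD years i 0 - PySem.List.pyGetD years (i - 1) 0
        if gen_gap_min ≤ gap ∧ gap ≤ gen_gap_max then (st.1 + 1, max st.2 (st.1 + 1))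
        else (1, st.2)) (1, 1)
    st.2

-- ===== PORT B =====
-- port of Source B's helper _runs: run-length encode a list of booleans, as recursion on
-- the suffix starting at i: the inner `while k < n and flags[k] == f: k += 1` counts
-- 1 + length of the maximal prefix of the tail equal to f, and `i = k` continues
-- right after that run (the dropWhile).
def pyRunLengths : List Bool → List (Bool × Int)
  | [] => []
  | f :: t =>
      (f, 1 + ((t.takeWhile (· == f)).length : Int)) :: pyRunLengths (t.dropWhile (· == f))
termination_by fs => fs.length
decreasing_by
  simpa using Nat.lt_succ_of_le (List.length_dropWhile_le _ _)

def check_consecutive_generations_py_alt (years : List Int) (gen_gap_min : Int) (gen_gap_max : Int) : Int :=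
  if years.length < 2 then 1
  else
    let flags := (years.zip (PySem.List.slice years (some 1) none)).map
      (fun p => decide (gen_gap_min ≤ p.2 - p.1 ∧ p.2 - p.1 ≤ gen_gap_max))
    let best := (pyRunLengths flags).foldl
      (fun best r => if r.1 then max best r.2 else best) 0
    best + 1

-- ===== PRECONDITION & SPEC =====
def Spec_check_consecutive_generations_py (years : List Int) (gen_gap_min : Int) (gen_gap_max : Int) (out : Int) : Prop := out = check_consecutive_generations_py_alt years gen_gap_min gen_gap_max
instance (years : List Int) (gen_gap_min : Int) (gen_gap_max : Int) (out : Int) : Decidable (Spec_check_consecutive_generations_py years gen_gap_min gen_gap_max out) := by unfold Spec_check_consecutive_generations_py; infer_instance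

-- ===== CLAIM (what is proved, stated in full; the proofs are below) =====
def Claim_equal_check_consecutive_generations_py : Prop := ∀ (years : List Int) (gen_gap_min : Int) (gen_gap_max : Int), Dom_check_consecutive_generations_py years gen_gap_min gen_gap_max → Spec_check_consecutive_generations_py years gen_gap_min gen_gap_max (check_consecutive_generations_py years gen_gap_min gen_gap_max)

-- ===== LEMMAS AND PROOFS =====

-- the step of A's loop, seen as a function of the gap-validity flag
def pvStepF (st : Int × Int) (f : Bool) : Int × Int :=
  if f then (st.1 + 1, max st.2 (st.1 + 1)) else (1, st.2)

-- maximum value ever reached by A's `consecutive` counter (floored at 1),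
-- starting from counter value c
def pvM : Int → List Bool → Int
  | _, [] => 1
  | c, true :: t => max (c + 1) (pvM (c + 1) t)
  | _, false :: t => pvM 1 t

theorem pvGetD_cons_shift (x : Int) (l : List Int) (i : Int) (d : Int) (h : 0 ≤ i) :
    PySem.List.pyGetD (x :: l) (i + 1) d = PySem.List.pyGetD l i d := by
  by_cases hl : i < (l.length : Int)
  · rw [PySem.List.pyGetD_eq_getElem _ d (by omega) (by push_cast [List.length_cons]; omega),
        PySem.List.pyGetD_eq_getElem _ d h hl]
    have : (i + 1).toNat = i.toNat + 1 := by omega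
    simp [this]
  · simp only [PySem.List.pyGetD, PySem.List.pyGet?, PySem.List.pyIdx?]
    have h1 : ¬ i + 1 < ((x :: l).length : Int) := by push_cast [List.length_cons]; omega
    have hp : (0:Int) ≤ i + 1 := by omega
    simp [hl, h, hp]

theorem pvRange_shift (n : Int) :
    PySem.List.pyRange (1 + 1) (n + 1) = (PySem.List.pyRange 1 n).map (· + 1) := by
  rw [PySem.List.pyRange_one, PySem.List.pyRange_one, List.map_map]
  have h : (n + 1 - (1 + 1)).toNat = (n - 1).toNat := by omega
  rw [h]
  refine List.map_congr_left ?_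
  intro k _; simp; omega

-- A's indexed loop over range(1, len) equals a fold over the adjacent pairs
theorem pvFoldA_pairs (gmin gmax : Int) : ∀ (l : List Int) (a : Int) (st : Int × Int),
    (PySem.List.pyRange 1 ((a :: l).length : Int)).foldl
      (fun (st : Int × Int) i =>
        let gap := PySem.List.pyGetD (a :: l) i 0 - PySem.List.pyGetD (a :: l) (i - 1) 0
        if gmin ≤ gap ∧ gap ≤ gmax then (st.1 + 1, max st.2 (st.1 + 1))
        else (1, st.2)) st
    = ((a :: l).zip l).foldl
      (fun (st : Int × Int) p =>
        if gmin ≤ p.2 - p.1 ∧ p.2 - p.1 ≤ gmax then (st.1 + 1, max st.2 (st.1 + 1))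
        else (1, st.2)) st := by
  intro l
  induction l with
  | nil => intro a st; rw [PySem.List.pyRange_one_eq_nil (by simp)]; simp
  | cons b t ih =>
    intro a st
    rw [PySem.List.pyRange_one_cons (by simp)]
    simp only [List.foldl_cons]
    have h1 : PySem.List.pyGetD (a :: b :: t) 1 0 = b := by
      have h := pvGetD_cons_shift a (b :: t) 0 0 le_rfl
      norm_num [PySem.List.pyGetD_zero_cons] at h
      exact h
    have h0 : PySem.List.pyGetD (a :: b :: t) (1 - 1) 0 = a := by
      norm_num [PySem.List.pyGetD_zero_cons]
    rw [h1, h0]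
    have hlen : ((a :: b :: t).length : Int) = ((b :: t).length : Int) + 1 := by simp
    rw [hlen, pvRange_shift, List.foldl_map]
    rw [PySem.List.foldl_congr_mem _ _
      (fun (st : Int × Int) i =>
        let gap := PySem.List.pyGetD (b :: t) i 0 - PySem.List.pyGetD (b :: t) (i - 1) 0
        if gmin ≤ gap ∧ gap ≤ gmax then (st.1 + 1, max st.2 (st.1 + 1))
        else (1, st.2)) _ ?_]
    · rw [ih b]
      simp [List.zip]
    · intro acc x hx
      have hx1 : 1 ≤ x := (PySem.List.mem_pyRange_one.mp hx).1
      have e1 : PySem.List.pyGetD (a :: b :: t) (x + 1) 0 = PySem.List.pyGetD (b :: t) x 0 :=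
        pvGetD_cons_shift _ _ _ _ (by omega)
      have e2 : PySem.List.pyGetD (a :: b :: t) (x + 1 - 1) 0
          = PySem.List.pyGetD (b :: t) (x - 1) 0 := by
        have : x + 1 - 1 = (x - 1) + 1 := by ring
        rw [this, pvGetD_cons_shift _ _ _ _ (by omega)]
      simp only [e1, e2]

-- the fold of A's step equals max of the accumulator and pvM
theorem pvFoldF_M : ∀ (fs : List Bool) (c m : Int), 1 ≤ m →
    (fs.foldl pvStepF (c, m)).2 = max m (pvM c fs) := by
  intro fs
  induction fs with
  | nil => intro c m hm; simp [pvM]; omega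
  | cons f t ih =>
    intro c m hm
    cases f with
    | true =>
      simp only [List.foldl_cons, pvStepF, ite_true, pvM]
      rw [ih (c + 1) (max m (c + 1)) (by omega)]
      omega
    | false =>
      simp only [List.foldl_cons, pvStepF, Bool.false_eq_true, if_false, pvM]
      exact ih 1 m hm

theorem pvM_run : ∀ (t : List Bool) (c : Int), 0 ≤ c →
    pvM c (true :: t)
      = max (c + 1 + ((t.takeWhile (· == true)).length : Int))
            (pvM 1 (t.dropWhile (· == true))) := by
  intro t
  induction t with
  | nil => intro c hc; simp [pvM]
  | cons f u ih =>
    intro c hc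
    cases f with
    | true =>
      have h1 : pvM c (true :: true :: u) = max (c + 1) (pvM (c + 1) (true :: u)) := rfl
      have hc1 : (0:Int) ≤ c + 1 := by omega
      rw [h1, ih (c + 1) hc1]
      simp only [List.takeWhile_cons, List.dropWhile_cons, BEq.rfl, if_pos]
      simp only [List.length_cons]
      push_cast
      omega
    | false =>
      have h1 : pvM c (true :: false :: u) = max (c + 1) (pvM 1 (false :: u)) := rfl
      have h2 : pvM 1 (false :: u) = pvM 1 u := rfl
      rw [h1]
      simp [h2]

theorem pvM_dropFalse : ∀ (t : List Bool), pvM 1 (t.dropWhile (· == false)) = pvM 1 t := by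
  intro t
  induction t with
  | nil => rfl
  | cons f u ih =>
    cases f with
    | true => simp
    | false =>
      have h2 : pvM 1 (false :: u) = pvM 1 u := rfl
      rw [show List.dropWhile (· == false) (false :: u) = List.dropWhile (· == false) u from rfl,
          ih, h2]

-- B's best-accumulating loop
def pvBestStep (b : Int) (r : Bool × Int) : Int := if r.1 then max b r.2 else b

theorem pvBest_le : ∀ (rs : List (Bool × Int)) (a : Int), a ≤ rs.foldl pvBestStep a := by
  intro rs
  induction rs with
  | nil => intro a; simp
  | cons r t ih =>
    intro a
    simp only [List.foldl_cons, pvBestStep]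
    split
    · exact le_trans (le_max_left a r.2) (ih _)
    · exact ih a

theorem pvBest_acc : ∀ (rs : List (Bool × Int)) (a : Int), 0 ≤ a →
    rs.foldl pvBestStep a = max a (rs.foldl pvBestStep 0) := by
  intro rs
  induction rs with
  | nil => intro a ha; simp; omega
  | cons r t ih =>
    intro a ha
    simp only [List.foldl_cons, pvBestStep]
    split
    · rw [ih (max a r.2) (by omega), ih (max 0 r.2) (by omega)]
      have := pvBest_le t 0
      omega
    · exact ih a ha

-- main bridge: pvM 1 is one more than B's best true-run length
theorem pvM_best : ∀ (n : Nat) (fs : List Bool), fs.length ≤ n →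
    pvM 1 fs = 1 + (pyRunLengths fs).foldl pvBestStep 0 := by
  intro n
  induction n with
  | zero =>
    intro fs h
    have : fs = [] := List.eq_nil_of_length_eq_zero (by omega)
    subst this
    simp [pvM, pyRunLengths]
  | succ n ih =>
    intro fs h
    match fs with
    | [] => simp [pvM, pyRunLengths]
    | false :: t =>
      have hd : (t.dropWhile (· == false)).length ≤ n :=
        le_trans (List.length_dropWhile_le _ _) (by simpa using h)
      have : pvM 1 (false :: t) = pvM 1 t := rfl
      rw [this, ← pvM_dropFalse t, ih _ hd]
      rw [pyRunLengths]
      simp [pvBestStep]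
    | true :: t =>
      have hd : (t.dropWhile (· == true)).length ≤ n :=
        le_trans (List.length_dropWhile_le _ _) (by simpa using h)
      rw [pvM_run t 1 (by omega), ih _ hd, pyRunLengths]
      simp only [List.foldl_cons, pvBestStep, ite_true]
      rw [pvBest_acc (pyRunLengths (t.dropWhile (· == true)))
            (max 0 (1 + ((t.takeWhile (· == true)).length : Int))) (by omega)]
      have := pvBest_le (pyRunLengths (t.dropWhile (· == true))) 0
      have hL : (0 : Int) ≤ ((t.takeWhile (· == true)).length : Int) := by positivity
      omega

-- ===== VERDICT (by name: the statement is the Claim_ definition above) =====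
theorem check_consecutive_generations_py_spec : Claim_equal_check_consecutive_generations_py := by
  intro years gmin gmax _hdom
  unfold Spec_check_consecutive_generations_py
  unfold check_consecutive_generations_py check_consecutive_generations_py_alt
  by_cases hlen : years.length < 2
  · simp [hlen]
  · simp only [if_neg hlen]
    match years, hlen with
    | a :: l, hlen =>
      rw [pvFoldA_pairs gmin gmax l a (1, 1)]
      rw [PySem.List.slice_from_one]
      simp only [List.tail_cons]
      have hmap : ((a :: l).zip l).foldl
          (fun (st : Int × Int) p =>
            if gmin ≤ p.2 - p.1 ∧ p.2 - p.1 ≤ gmax then (st.1 + 1, max st.2 (st.1 + 1))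
            else (1, st.2)) (1, 1)
          = (((a :: l).zip l).map
              (fun p => decide (gmin ≤ p.2 - p.1 ∧ p.2 - p.1 ≤ gmax))).foldl pvStepF (1, 1) := by
        rw [List.foldl_map]
        refine PySem.List.foldl_congr_mem _ _ _ _ ?_
        intro acc x _
        simp [pvStepF]
      rw [show (fun (best : Int) (r : Bool × Int) => if r.1 then max best r.2 else best)
            = pvBestStep from rfl,
          hmap, pvFoldF_M _ 1 1 (by omega),
          pvM_best (((a :: l).zip l).map
            (fun p => decide (gmin ≤ p.2 - p.1 ∧ p.2 - p.1 ≤ gmax))).length _ le_rfl]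
      have := pvBest_le (pyRunLengths (((a :: l).zip l).map
        (fun p => decide (gmin ≤ p.2 - p.1 ∧ p.2 - p.1 ≤ gmax)))) 0
      omega
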